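-- pv_equiv track=rewrite | github.com/wkiri/MTE | experiments/within-sentence-experiments/unaryParser/extraction_utils.py | get_docidx_from_offset
-- ===== SOURCE A (Python) =====
-- def get_docidx_from_offset(doc_start_char, doc_end_char, offset2docidx):
--     """
--         This function gets the starting and ending document-level word indices for an entity given the entity's document-level offset.
--     """
--     begin_idx = None
--     end_idx = None # exclusive
--     for offset in offset2docidx:
--         if offset[0] <= doc_start_char < offset[1]:
--             begin_idx = offset2docidx[offset]
--         if  offset[0] < doc_end_char <= offset[1]:
--             end_idx = offset2docidx[offset]
--     return (begin_idx, end_idx)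
-- ===== SOURCE B (Python) =====
-- def get_docidx_from_offset(doc_start_char, doc_end_char, offset2docidx):
--     """
--         This function gets the starting and ending document-level word indices for an entity given the entity's document-level offset.
--     """
--     # Two early-exiting reverse scans: the first reverse match equals A's last forward match.
--     begin_idx = None
--     for offset in reversed(offset2docidx):
--         if offset[0] <= doc_start_char < offset[1]:
--             begin_idx = offset2docidx[offset]
--             break
--     end_idx = None
--     for offset in reversed(offset2docidx):
--         if offset[0] < doc_end_char <= offset[1]:
--             end_idx = offset2docidx[offset]
--             break
--     return (begin_idx, end_idx)
-- ===== Notes on version B (the rewrite author's own statement) =====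
-- stated objective: alternative
-- what changed: Replaces the single full scan that keeps overwriting both accumulators with two independent reverse scans that each stop at the first matching interval (first reverse match = last forward match).
import Mathlib
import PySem

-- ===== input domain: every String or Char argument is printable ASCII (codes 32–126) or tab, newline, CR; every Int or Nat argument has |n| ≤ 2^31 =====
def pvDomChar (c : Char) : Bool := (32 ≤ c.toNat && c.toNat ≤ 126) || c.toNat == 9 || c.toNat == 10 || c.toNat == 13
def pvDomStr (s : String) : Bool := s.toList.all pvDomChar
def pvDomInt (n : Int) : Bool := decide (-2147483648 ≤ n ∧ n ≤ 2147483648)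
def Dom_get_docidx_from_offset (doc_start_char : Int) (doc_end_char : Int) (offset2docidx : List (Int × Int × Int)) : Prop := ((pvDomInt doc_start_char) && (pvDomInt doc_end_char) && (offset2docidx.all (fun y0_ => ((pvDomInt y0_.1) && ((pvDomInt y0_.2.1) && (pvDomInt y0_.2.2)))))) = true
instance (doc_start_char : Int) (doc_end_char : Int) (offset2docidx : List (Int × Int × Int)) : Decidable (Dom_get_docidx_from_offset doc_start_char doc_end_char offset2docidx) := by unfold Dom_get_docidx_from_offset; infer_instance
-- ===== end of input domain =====

-- B replaces A's single overwriting scan by two early-exiting reverse scans (same result); objective: alternative decomposition.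


-- shared input decoding: the Python argument is a dict {(start,end): idx}; rebuild it as a PySem.Dict
def pvDictOf (offset2docidx : List (Int × Int × Int)) : PySem.Dict (Int × Int) Int :=
  PySem.Dict.ofList (offset2docidx.map (fun t => ((t.1, t.2.1), t.2.2)))

-- ===== PORT A =====
-- one forward pass over the keys, overwriting begin_idx / end_idx on every match
def get_docidx_from_offset (doc_start_char : Int) (doc_end_char : Int) (offset2docidx : List (Int × Int × Int)) : Option Int × Option Int :=
  let d := pvDictOf offset2docidx
  d.keys.foldl (fun (st : Option Int × Option Int) k =>
    let st1 := if k.1 ≤ doc_start_char ∧ doc_start_char < k.2 then (d.get? k, st.2) else st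
    if k.1 < doc_end_char ∧ doc_end_char ≤ k.2 then (st1.1, d.get? k) else st1)
    (none, none)

-- ===== PORT B =====
-- two reverse scans, each stopping at the first matching interval ('break')
def get_docidx_from_offset_alt (doc_start_char : Int) (doc_end_char : Int) (offset2docidx : List (Int × Int × Int)) : Option Int × Option Int :=
  let d := pvDictOf offset2docidx
  let begin_idx := (d.keys.reverse.find? (fun k => decide (k.1 ≤ doc_start_char ∧ doc_start_char < k.2))).bind d.get?
  let end_idx := (d.keys.reverse.find? (fun k => decide (k.1 < doc_end_char ∧ doc_end_char ≤ k.2))).bind d.get?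
  (begin_idx, end_idx)

-- ===== PRECONDITION & SPEC =====
def Spec_get_docidx_from_offset (doc_start_char : Int) (doc_end_char : Int) (offset2docidx : List (Int × Int × Int)) (out : Option Int × Option Int) : Prop := out = get_docidx_from_offset_alt doc_start_char doc_end_char offset2docidx
instance (doc_start_char : Int) (doc_end_char : Int) (offset2docidx : List (Int × Int × Int)) (out : Option Int × Option Int) : Decidable (Spec_get_docidx_from_offset doc_start_char doc_end_char offset2docidx out) := by unfold Spec_get_docidx_from_offset; infer_instance

-- ===== CLAIM (what is proved, stated in full; the proofs are below) =====
def Claim_equal_get_docidx_from_offset : Prop := ∀ (doc_start_char : Int) (doc_end_char : Int) (offset2docidx : List (Int × Int × Int)), Dom_get_docidx_from_offset doc_start_char doc_end_char offset2docidx → Spec_get_docidx_from_offset doc_start_char doc_end_char offset2docidx (get_docidx_from_offset doc_start_char doc_end_char offset2docidx)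

-- ===== LEMMAS AND PROOFS =====

-- A's overwriting fold computes, in each component, the image of the LAST matching key,
-- i.e. of the FIRST match in the reversed key list.
theorem pv_foldl_last_match {κ : Type} (p q : κ → Prop) [DecidablePred p] [DecidablePred q]
    (f : κ → Option Int) (ks : List κ) (acc : Option Int × Option Int) :
    ks.foldl (fun (st : Option Int × Option Int) k =>
        let st1 := if p k then (f k, st.2) else st
        if q k then (st1.1, f k) else st1) acc
      = ((ks.reverse.find? (fun k => decide (p k))).elim acc.1 f,
         (ks.reverse.find? (fun k => decide (q k))).elim acc.2 f) := by
  induction ks generalizing acc with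
  | nil => simp
  | cons x ks ih =>
      have hstep : (let st1 := if p x then (f x, acc.2) else acc;
                    if q x then (st1.1, f x) else st1)
          = (if p x then f x else acc.1, if q x then f x else acc.2) := by
        by_cases hp : p x <;> by_cases hq : q x <;> simp [hp, hq]
      simp only [List.foldl_cons, hstep, ih, List.reverse_cons, List.find?_append]
      rcases h1 : ks.reverse.find? (fun k => decide (p k)) with _ | k1 <;>
        rcases h2 : ks.reverse.find? (fun k => decide (q k)) with _ | k2 <;>
        by_cases hp : p x <;> by_cases hq : q x <;>
        simp [hp, hq, List.find?]
theorem get_docidx_from_offset_eq (doc_start_char doc_end_char : Int)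
    (offset2docidx : List (Int × Int × Int)) :
    get_docidx_from_offset doc_start_char doc_end_char offset2docidx
      = get_docidx_from_offset_alt doc_start_char doc_end_char offset2docidx := by
  show (pvDictOf offset2docidx).keys.foldl (fun (st : Option Int × Option Int) k =>
      let st1 := if k.1 ≤ doc_start_char ∧ doc_start_char < k.2
                 then ((pvDictOf offset2docidx).get? k, st.2) else st
      if k.1 < doc_end_char ∧ doc_end_char ≤ k.2
      then (st1.1, (pvDictOf offset2docidx).get? k) else st1) (none, none)
    = ((List.find? (fun k => decide (k.1 ≤ doc_start_char ∧ doc_start_char < k.2))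
          (pvDictOf offset2docidx).keys.reverse).bind (pvDictOf offset2docidx).get?,
       (List.find? (fun k => decide (k.1 < doc_end_char ∧ doc_end_char ≤ k.2))
          (pvDictOf offset2docidx).keys.reverse).bind (pvDictOf offset2docidx).get?)
  refine Eq.trans (pv_foldl_last_match (fun k => k.1 ≤ doc_start_char ∧ doc_start_char < k.2)
        (fun k => k.1 < doc_end_char ∧ doc_end_char ≤ k.2)
        ((pvDictOf offset2docidx).get?) ((pvDictOf offset2docidx).keys) (none, none)) ?_
  have hb : ∀ (o : Option (Int × Int)),
      o.elim none (pvDictOf offset2docidx).get? = o.bind (pvDictOf offset2docidx).get? :=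
    fun o => by cases o <;> rfl
  exact Prod.ext (hb _) (hb _)

-- ===== VERDICT (by name: the statement is the Claim_ definition above) =====
theorem get_docidx_from_offset_spec : Claim_equal_get_docidx_from_offset := by
  intro s e l _
  exact get_docidx_from_offset_eq s e l
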